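-- pv_equiv track=rewrite | github.com/brendonsa/AOC2024 | 21/main.py | generate_keypad_mapping
-- ===== SOURCE A (Python) =====
-- def is_over_none_position(from_coord, directions, none_coord):
--     current_pos = from_coord
--     for direction in directions:
--         for move in direction:
--             if move == '<':
--                 current_pos = (current_pos[0], current_pos[1] - 1)
--             elif move == '>':
--                 current_pos = (current_pos[0], current_pos[1] + 1)
--             elif move == 'v':
--                 current_pos = (current_pos[0] + 1, current_pos[1])
--             elif move == '^':
--                 current_pos = (current_pos[0] - 1, current_pos[1])
--             if current_pos == none_coord:
--                 return True
--     return False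
--
-- def calculate_directions(from_coord, to_coord, none_coord):
--     directions = []
--     delta_row = to_coord[0] - from_coord[0]
--     delta_col = to_coord[1] - from_coord[1]
--
--     if delta_col < 0:
--         directions.append('<' * abs(delta_col))
--     if delta_row > 0:
--         directions.append('v' * abs(delta_row))
--
--     if delta_row < 0:
--         directions.append('^' * abs(delta_row))
--     if delta_col > 0:
--         directions.append('>' * delta_col)
--
--     if is_over_none_position(from_coord, directions, none_coord):
--         directions.reverse()
--
--
--     directions.append('A')
--
--     return ''.join(directions)
--
-- def generate_keypad_mapping(keypad, none_coord):
--     mapping = {}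
--
--     for from_key, from_coord in keypad.items():
--         mapping[from_key] = {}
--         for to_key, to_coord in keypad.items():
--             if from_key != to_key:  # No need to map a key to itself
--                 mapping[from_key][to_key] = calculate_directions(from_coord, to_coord,none_coord)
--
--     return mapping
-- ===== SOURCE B (Python) =====
-- def _between(x, a, b):
--     return min(a, b) <= x <= max(a, b)
--
-- def _hits_gap(from_coord, to_coord, none_coord, horiz_first):
--     fr, fc = from_coord
--     tr, tc = to_coord
--     nr, nc = none_coord
--     if (nr, nc) == (fr, fc):
--         return False
--     if horiz_first:
--         return (nr == fr and _between(nc, fc, tc)) or (nc == tc and _between(nr, fr, tr))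
--     return (nc == fc and _between(nr, fr, tr)) or (nr == tr and _between(nc, fc, tc))
--
-- def _path(from_coord, to_coord, none_coord):
--     fr, fc = from_coord
--     tr, tc = to_coord
--     horiz = ('<' if tc < fc else '>') * abs(tc - fc)
--     vert = ('v' if tr > fr else '^') * abs(tr - fr)
--     horiz_first = tc < fc
--     first, second = (horiz, vert) if horiz_first else (vert, horiz)
--     if _hits_gap(from_coord, to_coord, none_coord, horiz_first):
--         first, second = second, first
--     return first + second + 'A'
--
-- def generate_keypad_mapping(keypad, none_coord):
--     return {fk: {tk: _path(fc, tc, none_coord)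
--                  for tk, tc in keypad.items() if fk != tk}
--             for fk, fc in keypad.items()}
-- ===== Notes on version B (the rewrite author's own statement) =====
-- stated objective: alternative
-- what changed: B replaces A's step-by-step simulated walk over the emitted move strings (and its list-append-then-reverse) with a closed-form geometric test of the two legs of the L-path, choosing the leg order directly; the nested dict loops become a dict comprehension.
import Mathlib
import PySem

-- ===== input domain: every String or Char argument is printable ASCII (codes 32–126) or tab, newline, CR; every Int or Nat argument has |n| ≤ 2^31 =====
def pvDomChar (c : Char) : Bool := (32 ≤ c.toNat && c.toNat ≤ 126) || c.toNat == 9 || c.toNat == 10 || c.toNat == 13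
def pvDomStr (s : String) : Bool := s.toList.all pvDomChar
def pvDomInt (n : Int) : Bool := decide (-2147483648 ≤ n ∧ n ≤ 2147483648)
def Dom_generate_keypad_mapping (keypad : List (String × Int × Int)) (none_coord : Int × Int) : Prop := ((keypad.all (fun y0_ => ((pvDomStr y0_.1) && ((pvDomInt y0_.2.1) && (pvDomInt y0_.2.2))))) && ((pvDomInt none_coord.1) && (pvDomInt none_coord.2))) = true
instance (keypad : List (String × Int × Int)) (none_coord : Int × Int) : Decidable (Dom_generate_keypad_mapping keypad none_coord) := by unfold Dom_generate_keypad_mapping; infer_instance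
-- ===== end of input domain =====

-- B replaces A's step-by-step walk over the emitted move strings with a closed-form
-- geometric test of the two legs of the L-path (objective: alternative, same asymptotic cost).

-- ===== PORT A =====
-- one move of is_over_none_position: state = (found-flag, current position); once the
-- flag is true the Python has already returned, so the state is frozen
def pvStep (none_coord : Int × Int) (st : Bool × (Int × Int)) (move : Char) : Bool × (Int × Int) :=
  if st.1 then st
  else
    let p := st.2
    let p' := if move = '<' then (p.1, p.2 - 1)
      else if move = '>' then (p.1, p.2 + 1)
      else if move = 'v' then (p.1 + 1, p.2)
      else if move = '^' then (p.1 - 1, p.2)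
      else p
    (p' == none_coord, p')

def pvIsOver (from_coord : Int × Int) (directions : List (List Char)) (none_coord : Int × Int) : Bool :=
  (directions.foldl (fun st dir => dir.foldl (pvStep none_coord) st) (false, from_coord)).1

def pvCalcDirections (from_coord to_coord none_coord : Int × Int) : String :=
  let delta_row := to_coord.1 - from_coord.1
  let delta_col := to_coord.2 - from_coord.2
  let d : List (List Char) := []
  let d := if delta_col < 0 then d ++ [List.replicate delta_col.natAbs '<'] else d
  let d := if delta_row > 0 then d ++ [List.replicate delta_row.natAbs 'v'] else d
  let d := if delta_row < 0 then d ++ [List.replicate delta_row.natAbs '^'] else d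
  let d := if delta_col > 0 then d ++ [List.replicate delta_col.natAbs '>'] else d
  let d := if pvIsOver from_coord d none_coord then d.reverse else d
  String.mk ((d ++ [['A']]).flatten)

def generate_keypad_mapping (keypad : List (String × Int × Int)) (none_coord : Int × Int) : List (String × List (String × String)) :=
  ((keypad.foldl (fun (m : PySem.Dict String (PySem.Dict String String)) f =>
      m.insert f.1 (keypad.foldl (fun inner t =>
        if f.1 ≠ t.1 then inner.insert t.1 (pvCalcDirections f.2 t.2 none_coord) else inner)
        PySem.Dict.empty)) PySem.Dict.empty).items).map (fun p => (p.1, p.2.items))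

-- ===== PORT B =====
def pvBetween (x a b : Int) : Bool := decide (min a b ≤ x) && decide (x ≤ max a b)

def pvHitsGap (from_coord to_coord none_coord : Int × Int) (horiz_first : Bool) : Bool :=
  let fr := from_coord.1
  let fc := from_coord.2
  let tr := to_coord.1
  let tc := to_coord.2
  let nr := none_coord.1
  let nc := none_coord.2
  if (nr, nc) == (fr, fc) then false
  else if horiz_first then (nr == fr && pvBetween nc fc tc) || (nc == tc && pvBetween nr fr tr)
  else (nc == fc && pvBetween nr fr tr) || (nr == tr && pvBetween nc fc tc)

def pvPath (from_coord to_coord none_coord : Int × Int) : String :=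
  let fr := from_coord.1
  let fc := from_coord.2
  let tr := to_coord.1
  let tc := to_coord.2
  let horiz := List.replicate (tc - fc).natAbs (if tc < fc then '<' else '>')
  let vert := List.replicate (tr - fr).natAbs (if tr > fr then 'v' else '^')
  let horiz_first := tc < fc
  let fs := if horiz_first then (horiz, vert) else (vert, horiz)
  let fs := if pvHitsGap from_coord to_coord none_coord horiz_first then (fs.2, fs.1) else fs
  String.mk (fs.1 ++ fs.2 ++ ['A'])

def generate_keypad_mapping_alt (keypad : List (String × Int × Int)) (none_coord : Int × Int) : List (String × List (String × String)) :=
  keypad.map (fun f =>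
    (f.1, (keypad.filter (fun t => f.1 ≠ t.1)).map (fun t => (t.1, pvPath f.2 t.2 none_coord))))

-- ===== PRECONDITION & SPEC =====
-- The keypad parameter is a Python dict, which can never hold two entries with the same
-- key; Pre_ excludes association lists with duplicate keys, which represent no dict.
def Pre_generate_keypad_mapping (keypad : List (String × Int × Int)) (none_coord : Int × Int) : Prop :=
  (keypad.map Prod.fst).Nodup
instance (keypad : List (String × Int × Int)) (none_coord : Int × Int) : Decidable (Pre_generate_keypad_mapping keypad none_coord) := by unfold Pre_generate_keypad_mapping; infer_instance

def pvWitness_generate_keypad_mapping : (List (String × Int × Int)) × (Int × Int) :=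
  ([("A", 0, 2), ("^", 0, 1), ("<", 1, 0)], (0, 0))

def Spec_generate_keypad_mapping (keypad : List (String × Int × Int)) (none_coord : Int × Int) (out : List (String × List (String × String))) : Prop := out = generate_keypad_mapping_alt keypad none_coord
instance (keypad : List (String × Int × Int)) (none_coord : Int × Int) (out : List (String × List (String × String))) : Decidable (Spec_generate_keypad_mapping keypad none_coord out) := by unfold Spec_generate_keypad_mapping; infer_instance

-- ===== CLAIM (what is proved, stated in full; the proofs are below) =====
def Claim_equal_generate_keypad_mapping : Prop := ∀ (keypad : List (String × Int × Int)) (none_coord : Int × Int), Dom_generate_keypad_mapping keypad none_coord → Pre_generate_keypad_mapping keypad none_coord → Spec_generate_keypad_mapping keypad none_coord (generate_keypad_mapping keypad none_coord)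

-- ===== LEMMAS AND PROOFS =====

theorem stepTrue (n : Int × Int) (p : Int × Int) (l : List Char) :
    l.foldl (pvStep n) (true, p) = (true, p) := by
  induction l with
  | nil => rfl
  | cons x xs ih => simpa [pvStep] using ih

theorem walkLeft (nr nc : Int) (m : Nat) : ∀ (r c : Int),
    (List.replicate m '<').foldl (pvStep (nr, nc)) (false, (r, c)) =
      if nr = r ∧ c - (m : Int) ≤ nc ∧ nc < c then (true, (nr, nc)) else (false, (r, c - (m : Int))) := by
  induction m with
  | zero =>
    intro r c
    rw [if_neg (by omega)]
    norm_num
  | succ k ih =>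
    intro r c
    rw [List.replicate_succ, List.foldl_cons]
    have hstep : pvStep (nr, nc) (false, (r, c)) '<' = (((r, c - 1) : Int × Int) == (nr, nc), (r, c - 1)) := by
      simp [pvStep]
    rw [hstep]
    by_cases h : r = nr ∧ c - 1 = nc
    · obtain ⟨h1, h2⟩ := h
      have hb : (((r, c - 1) : Int × Int) == (nr, nc)) = true := by
        simp [h1, h2]
      rw [hb, stepTrue, if_pos (by omega)]
      simp [h1, h2]
    · have hb : (((r, c - 1) : Int × Int) == (nr, nc)) = false := by
        rw [beq_eq_false_iff_ne]
        simpa [Prod.mk.injEq] using h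
      rw [hb, ih r (c - 1)]
      split_ifs with h1 h2 h2
      · rfl
      · exfalso; omega
      · exfalso; omega
      · refine Prod.ext rfl (Prod.ext rfl ?_)
        push_cast
        ring

theorem walkRight (nr nc : Int) (m : Nat) : ∀ (r c : Int),
    (List.replicate m '>').foldl (pvStep (nr, nc)) (false, (r, c)) =
      if nr = r ∧ c < nc ∧ nc ≤ c + (m : Int) then (true, (nr, nc)) else (false, (r, c + (m : Int))) := by
  induction m with
  | zero =>
    intro r c
    rw [if_neg (by omega)]
    norm_num
  | succ k ih =>
    intro r c
    rw [List.replicate_succ, List.foldl_cons]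
    have hstep : pvStep (nr, nc) (false, (r, c)) '>' = (((r, c + 1) : Int × Int) == (nr, nc), (r, c + 1)) := by
      simp [pvStep]
    rw [hstep]
    by_cases h : r = nr ∧ c + 1 = nc
    · obtain ⟨h1, h2⟩ := h
      have hb : (((r, c + 1) : Int × Int) == (nr, nc)) = true := by
        simp [h1, h2]
      rw [hb, stepTrue, if_pos (by omega)]
      simp [h1, h2]
    · have hb : (((r, c + 1) : Int × Int) == (nr, nc)) = false := by
        rw [beq_eq_false_iff_ne]
        simpa [Prod.mk.injEq] using h
      rw [hb, ih r (c + 1)]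
      split_ifs with h1 h2 h2
      · rfl
      · exfalso; omega
      · exfalso; omega
      · refine Prod.ext rfl (Prod.ext ?_ ?_) <;> (push_cast; ring)

theorem walkDown (nr nc : Int) (m : Nat) : ∀ (r c : Int),
    (List.replicate m 'v').foldl (pvStep (nr, nc)) (false, (r, c)) =
      if nc = c ∧ r < nr ∧ nr ≤ r + (m : Int) then (true, (nr, nc)) else (false, (r + (m : Int), c)) := by
  induction m with
  | zero =>
    intro r c
    rw [if_neg (by omega)]
    norm_num
  | succ k ih =>
    intro r c
    rw [List.replicate_succ, List.foldl_cons]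
    have hstep : pvStep (nr, nc) (false, (r, c)) 'v' = (((r + 1, c) : Int × Int) == (nr, nc), (r + 1, c)) := by
      simp [pvStep]
    rw [hstep]
    by_cases h : r + 1 = nr ∧ c = nc
    · obtain ⟨h1, h2⟩ := h
      have hb : (((r + 1, c) : Int × Int) == (nr, nc)) = true := by
        simp [h1, h2]
      rw [hb, stepTrue, if_pos (by omega)]
      simp [h1, h2]
    · have hb : (((r + 1, c) : Int × Int) == (nr, nc)) = false := by
        rw [beq_eq_false_iff_ne]
        simpa [Prod.mk.injEq] using h
      rw [hb, ih (r + 1) c]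
      split_ifs with h1 h2 h2
      · rfl
      · exfalso; omega
      · exfalso; omega
      · refine Prod.ext rfl (Prod.ext ?_ ?_) <;> (push_cast; ring)

theorem walkUp (nr nc : Int) (m : Nat) : ∀ (r c : Int),
    (List.replicate m '^').foldl (pvStep (nr, nc)) (false, (r, c)) =
      if nc = c ∧ r - (m : Int) ≤ nr ∧ nr < r then (true, (nr, nc)) else (false, (r - (m : Int), c)) := by
  induction m with
  | zero =>
    intro r c
    rw [if_neg (by omega)]
    norm_num
  | succ k ih =>
    intro r c
    rw [List.replicate_succ, List.foldl_cons]
    have hstep : pvStep (nr, nc) (false, (r, c)) '^' = (((r - 1, c) : Int × Int) == (nr, nc), (r - 1, c)) := by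
      simp [pvStep]
    rw [hstep]
    by_cases h : r - 1 = nr ∧ c = nc
    · obtain ⟨h1, h2⟩ := h
      have hb : (((r - 1, c) : Int × Int) == (nr, nc)) = true := by
        simp [h1, h2]
      rw [hb, stepTrue, if_pos (by omega)]
      simp [h1, h2]
    · have hb : (((r - 1, c) : Int × Int) == (nr, nc)) = false := by
        rw [beq_eq_false_iff_ne]
        simpa [Prod.mk.injEq] using h
      rw [hb, ih (r - 1) c]
      split_ifs with h1 h2 h2
      · rfl
      · exfalso; omega
      · exfalso; omega
      · refine Prod.ext rfl (Prod.ext ?_ ?_) <;> (push_cast; ring)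

theorem core (fr fc tr tc nr nc : Int) :
    pvCalcDirections (fr, fc) (tr, tc) (nr, nc) = pvPath (fr, fc) (tr, tc) (nr, nc) := by
  rcases lt_trichotomy (tc - fc) 0 with hc | hc | hc <;>
    rcases lt_trichotomy (tr - fr) 0 with hr | hr | hr
  · have hc2 : ¬ (0 < tc - fc) := by omega
    have hb1 : tc < fc := by omega
    have hm1 : (((tc - fc).natAbs : Nat) : Int) = fc - tc := by omega
    have hr2 : ¬ (0 < tr - fr) := by omega
    have hb2 : ¬ (fr < tr) := by omega
    have hm2 : (((tr - fr).natAbs : Nat) : Int) = fr - tr := by omega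
    simp only [pvCalcDirections, pvIsOver, pvPath, hc, hr, hc2, hb1, hr2, hb2, decide_true, decide_false,
      ite_true, ite_false, Int.natAbs_zero, List.replicate_zero, lt_self_iff_false,
      List.singleton_append, List.cons_append, List.nil_append, List.foldl_cons, List.foldl_nil]
    rw [walkLeft nr nc (tc - fc).natAbs fr fc]
    simp only [hm1, hm2]
    by_cases hP1 : nr = fr ∧ fc - (fc - tc) ≤ nc ∧ nc < fc
    · rw [if_pos hP1, stepTrue]
      have hB : pvHitsGap (fr, fc) (tr, tc) (nr, nc) true = true := by
        simp only [pvHitsGap, pvBetween, Bool.false_eq_true, Bool.true_eq_false, beq_iff_eq,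
          beq_eq_false_iff_ne, ne_eq, Prod.mk.injEq, Bool.or_eq_true, Bool.and_eq_true,
          decide_eq_true_eq, Bool.or_eq_false_iff, Bool.and_eq_false_iff,
          decide_eq_false_iff_not, min_def, max_def]
        split_ifs <;>
    (try simp only [Bool.or_eq_true, Bool.and_eq_true, beq_iff_eq, decide_eq_true_eq,
      Bool.or_eq_false_iff, Bool.and_eq_false_iff, decide_eq_false_iff_not,
      beq_eq_false_iff_ne, ne_eq, Bool.false_eq_true]) <;>
    first | rfl | contradiction | omega
      rw [hB]
      simp [List.flatten]
    · rw [if_neg hP1]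
      rw [walkUp nr nc (tr - fr).natAbs fr (fc - (fc - tc))]
      simp only [hm1, hm2]
      by_cases hP2 : nc = fc - (fc - tc) ∧ fr - (fr - tr) ≤ nr ∧ nr < fr
      · rw [if_pos hP2]
        have hB : pvHitsGap (fr, fc) (tr, tc) (nr, nc) true = true := by
          simp only [pvHitsGap, pvBetween, Bool.false_eq_true, Bool.true_eq_false, beq_iff_eq,
            beq_eq_false_iff_ne, ne_eq, Prod.mk.injEq, Bool.or_eq_true, Bool.and_eq_true,
            decide_eq_true_eq, Bool.or_eq_false_iff, Bool.and_eq_false_iff,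
            decide_eq_false_iff_not, min_def, max_def]
          split_ifs <;>
    (try simp only [Bool.or_eq_true, Bool.and_eq_true, beq_iff_eq, decide_eq_true_eq,
      Bool.or_eq_false_iff, Bool.and_eq_false_iff, decide_eq_false_iff_not,
      beq_eq_false_iff_ne, ne_eq, Bool.false_eq_true]) <;>
    first | rfl | contradiction | omega
        rw [hB]
        simp [List.flatten]
      · rw [if_neg hP2]
        have hB : pvHitsGap (fr, fc) (tr, tc) (nr, nc) true = false := by
          simp only [pvHitsGap, pvBetween, Bool.false_eq_true, Bool.true_eq_false, beq_iff_eq,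
            beq_eq_false_iff_ne, ne_eq, Prod.mk.injEq, Bool.or_eq_true, Bool.and_eq_true,
            decide_eq_true_eq, Bool.or_eq_false_iff, Bool.and_eq_false_iff,
            decide_eq_false_iff_not, min_def, max_def]
          split_ifs <;>
    (try simp only [Bool.or_eq_true, Bool.and_eq_true, beq_iff_eq, decide_eq_true_eq,
      Bool.or_eq_false_iff, Bool.and_eq_false_iff, decide_eq_false_iff_not,
      beq_eq_false_iff_ne, ne_eq, Bool.false_eq_true]) <;>
    first | rfl | contradiction | omega
        rw [hB]
        simp [List.flatten]
  · have hc2 : ¬ (0 < tc - fc) := by omega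
    have hb1 : tc < fc := by omega
    have hm1 : (((tc - fc).natAbs : Nat) : Int) = fc - tc := by omega
    have hr2 : ¬ (tr - fr < 0) := by omega
    have hr3 : ¬ (0 < tr - fr) := by omega
    have hb2 : ¬ (fr < tr) := by omega
    simp only [pvCalcDirections, pvIsOver, pvPath, hc, hr, hc2, hb1, hr2, hr3, hb2, decide_true, decide_false,
      ite_true, ite_false, Int.natAbs_zero, List.replicate_zero, lt_self_iff_false,
      List.singleton_append, List.cons_append, List.nil_append, List.foldl_cons, List.foldl_nil]
    rw [walkLeft nr nc (tc - fc).natAbs fr fc]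
    simp only [hm1]
    by_cases hP1 : nr = fr ∧ fc - (fc - tc) ≤ nc ∧ nc < fc
    · rw [if_pos hP1]
      have hB : pvHitsGap (fr, fc) (tr, tc) (nr, nc) true = true := by
        simp only [pvHitsGap, pvBetween, Bool.false_eq_true, Bool.true_eq_false, beq_iff_eq,
          beq_eq_false_iff_ne, ne_eq, Prod.mk.injEq, Bool.or_eq_true, Bool.and_eq_true,
          decide_eq_true_eq, Bool.or_eq_false_iff, Bool.and_eq_false_iff,
          decide_eq_false_iff_not, min_def, max_def]
        split_ifs <;>
    (try simp only [Bool.or_eq_true, Bool.and_eq_true, beq_iff_eq, decide_eq_true_eq,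
      Bool.or_eq_false_iff, Bool.and_eq_false_iff, decide_eq_false_iff_not,
      beq_eq_false_iff_ne, ne_eq, Bool.false_eq_true]) <;>
    first | rfl | contradiction | omega
      rw [hB]
      simp [List.flatten]
    · rw [if_neg hP1]
      have hB : pvHitsGap (fr, fc) (tr, tc) (nr, nc) true = false := by
        simp only [pvHitsGap, pvBetween, Bool.false_eq_true, Bool.true_eq_false, beq_iff_eq,
          beq_eq_false_iff_ne, ne_eq, Prod.mk.injEq, Bool.or_eq_true, Bool.and_eq_true,
          decide_eq_true_eq, Bool.or_eq_false_iff, Bool.and_eq_false_iff,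
          decide_eq_false_iff_not, min_def, max_def]
        split_ifs <;>
    (try simp only [Bool.or_eq_true, Bool.and_eq_true, beq_iff_eq, decide_eq_true_eq,
      Bool.or_eq_false_iff, Bool.and_eq_false_iff, decide_eq_false_iff_not,
      beq_eq_false_iff_ne, ne_eq, Bool.false_eq_true]) <;>
    first | rfl | contradiction | omega
      rw [hB]
      simp [List.flatten]
  · have hc2 : ¬ (0 < tc - fc) := by omega
    have hb1 : tc < fc := by omega
    have hm1 : (((tc - fc).natAbs : Nat) : Int) = fc - tc := by omega
    have hr2 : ¬ (tr - fr < 0) := by omega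
    have hb2 : fr < tr := by omega
    have hm2 : (((tr - fr).natAbs : Nat) : Int) = tr - fr := by omega
    simp only [pvCalcDirections, pvIsOver, pvPath, hc, hr, hc2, hb1, hr2, hb2, decide_true, decide_false,
      ite_true, ite_false, Int.natAbs_zero, List.replicate_zero, lt_self_iff_false,
      List.singleton_append, List.cons_append, List.nil_append, List.foldl_cons, List.foldl_nil]
    rw [walkLeft nr nc (tc - fc).natAbs fr fc]
    simp only [hm1, hm2]
    by_cases hP1 : nr = fr ∧ fc - (fc - tc) ≤ nc ∧ nc < fc
    · rw [if_pos hP1, stepTrue]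
      have hB : pvHitsGap (fr, fc) (tr, tc) (nr, nc) true = true := by
        simp only [pvHitsGap, pvBetween, Bool.false_eq_true, Bool.true_eq_false, beq_iff_eq,
          beq_eq_false_iff_ne, ne_eq, Prod.mk.injEq, Bool.or_eq_true, Bool.and_eq_true,
          decide_eq_true_eq, Bool.or_eq_false_iff, Bool.and_eq_false_iff,
          decide_eq_false_iff_not, min_def, max_def]
        split_ifs <;>
    (try simp only [Bool.or_eq_true, Bool.and_eq_true, beq_iff_eq, decide_eq_true_eq,
      Bool.or_eq_false_iff, Bool.and_eq_false_iff, decide_eq_false_iff_not,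
      beq_eq_false_iff_ne, ne_eq, Bool.false_eq_true]) <;>
    first | rfl | contradiction | omega
      rw [hB]
      simp [List.flatten]
    · rw [if_neg hP1]
      rw [walkDown nr nc (tr - fr).natAbs fr (fc - (fc - tc))]
      simp only [hm1, hm2]
      by_cases hP2 : nc = fc - (fc - tc) ∧ fr < nr ∧ nr ≤ fr + (tr - fr)
      · rw [if_pos hP2]
        have hB : pvHitsGap (fr, fc) (tr, tc) (nr, nc) true = true := by
          simp only [pvHitsGap, pvBetween, Bool.false_eq_true, Bool.true_eq_false, beq_iff_eq,
            beq_eq_false_iff_ne, ne_eq, Prod.mk.injEq, Bool.or_eq_true, Bool.and_eq_true,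
            decide_eq_true_eq, Bool.or_eq_false_iff, Bool.and_eq_false_iff,
            decide_eq_false_iff_not, min_def, max_def]
          split_ifs <;>
    (try simp only [Bool.or_eq_true, Bool.and_eq_true, beq_iff_eq, decide_eq_true_eq,
      Bool.or_eq_false_iff, Bool.and_eq_false_iff, decide_eq_false_iff_not,
      beq_eq_false_iff_ne, ne_eq, Bool.false_eq_true]) <;>
    first | rfl | contradiction | omega
        rw [hB]
        simp [List.flatten]
      · rw [if_neg hP2]
        have hB : pvHitsGap (fr, fc) (tr, tc) (nr, nc) true = false := by
          simp only [pvHitsGap, pvBetween, Bool.false_eq_true, Bool.true_eq_false, beq_iff_eq,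
            beq_eq_false_iff_ne, ne_eq, Prod.mk.injEq, Bool.or_eq_true, Bool.and_eq_true,
            decide_eq_true_eq, Bool.or_eq_false_iff, Bool.and_eq_false_iff,
            decide_eq_false_iff_not, min_def, max_def]
          split_ifs <;>
    (try simp only [Bool.or_eq_true, Bool.and_eq_true, beq_iff_eq, decide_eq_true_eq,
      Bool.or_eq_false_iff, Bool.and_eq_false_iff, decide_eq_false_iff_not,
      beq_eq_false_iff_ne, ne_eq, Bool.false_eq_true]) <;>
    first | rfl | contradiction | omega
        rw [hB]
        simp [List.flatten]
  · have hc2 : ¬ (tc - fc < 0) := by omega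
    have hc3 : ¬ (0 < tc - fc) := by omega
    have hb1 : ¬ (tc < fc) := by omega
    have hr2 : ¬ (0 < tr - fr) := by omega
    have hb2 : ¬ (fr < tr) := by omega
    have hm2 : (((tr - fr).natAbs : Nat) : Int) = fr - tr := by omega
    simp only [pvCalcDirections, pvIsOver, pvPath, hc, hr, hc2, hc3, hb1, hr2, hb2, decide_true, decide_false,
      ite_true, ite_false, Int.natAbs_zero, List.replicate_zero, lt_self_iff_false,
      List.singleton_append, List.cons_append, List.nil_append, List.foldl_cons, List.foldl_nil]
    rw [walkUp nr nc (tr - fr).natAbs fr fc]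
    simp only [hm2]
    by_cases hP1 : nc = fc ∧ fr - (fr - tr) ≤ nr ∧ nr < fr
    · rw [if_pos hP1]
      have hB : pvHitsGap (fr, fc) (tr, tc) (nr, nc) false = true := by
        simp only [pvHitsGap, pvBetween, Bool.false_eq_true, Bool.true_eq_false, beq_iff_eq,
          beq_eq_false_iff_ne, ne_eq, Prod.mk.injEq, Bool.or_eq_true, Bool.and_eq_true,
          decide_eq_true_eq, Bool.or_eq_false_iff, Bool.and_eq_false_iff,
          decide_eq_false_iff_not, min_def, max_def]
        split_ifs <;>
    (try simp only [Bool.or_eq_true, Bool.and_eq_true, beq_iff_eq, decide_eq_true_eq,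
      Bool.or_eq_false_iff, Bool.and_eq_false_iff, decide_eq_false_iff_not,
      beq_eq_false_iff_ne, ne_eq, Bool.false_eq_true]) <;>
    first | rfl | contradiction | omega
      rw [hB]
      simp [List.flatten]
    · rw [if_neg hP1]
      have hB : pvHitsGap (fr, fc) (tr, tc) (nr, nc) false = false := by
        simp only [pvHitsGap, pvBetween, Bool.false_eq_true, Bool.true_eq_false, beq_iff_eq,
          beq_eq_false_iff_ne, ne_eq, Prod.mk.injEq, Bool.or_eq_true, Bool.and_eq_true,
          decide_eq_true_eq, Bool.or_eq_false_iff, Bool.and_eq_false_iff,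
          decide_eq_false_iff_not, min_def, max_def]
        split_ifs <;>
    (try simp only [Bool.or_eq_true, Bool.and_eq_true, beq_iff_eq, decide_eq_true_eq,
      Bool.or_eq_false_iff, Bool.and_eq_false_iff, decide_eq_false_iff_not,
      beq_eq_false_iff_ne, ne_eq, Bool.false_eq_true]) <;>
    first | rfl | contradiction | omega
      rw [hB]
      simp [List.flatten]
  · have hc2 : ¬ (tc - fc < 0) := by omega
    have hc3 : ¬ (0 < tc - fc) := by omega
    have hb1 : ¬ (tc < fc) := by omega
    have hr2 : ¬ (tr - fr < 0) := by omega
    have hr3 : ¬ (0 < tr - fr) := by omega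
    have hb2 : ¬ (fr < tr) := by omega
    simp only [pvCalcDirections, pvIsOver, pvPath, hc, hr, hc2, hc3, hb1, hr2, hr3, hb2, decide_true, decide_false,
      ite_true, ite_false, Int.natAbs_zero, List.replicate_zero, lt_self_iff_false,
      List.singleton_append, List.cons_append, List.nil_append, List.foldl_cons, List.foldl_nil]
    have hB : pvHitsGap (fr, fc) (tr, tc) (nr, nc) false = false := by
      simp only [pvHitsGap, pvBetween, Bool.false_eq_true, Bool.true_eq_false, beq_iff_eq,
        beq_eq_false_iff_ne, ne_eq, Prod.mk.injEq, Bool.or_eq_true, Bool.and_eq_true,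
        decide_eq_true_eq, Bool.or_eq_false_iff, Bool.and_eq_false_iff,
        decide_eq_false_iff_not, min_def, max_def]
      split_ifs <;>
    (try simp only [Bool.or_eq_true, Bool.and_eq_true, beq_iff_eq, decide_eq_true_eq,
      Bool.or_eq_false_iff, Bool.and_eq_false_iff, decide_eq_false_iff_not,
      beq_eq_false_iff_ne, ne_eq, Bool.false_eq_true]) <;>
    first | rfl | contradiction | omega
    rw [hB]
    simp [List.flatten]
  · have hc2 : ¬ (tc - fc < 0) := by omega
    have hc3 : ¬ (0 < tc - fc) := by omega
    have hb1 : ¬ (tc < fc) := by omega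
    have hr2 : ¬ (tr - fr < 0) := by omega
    have hb2 : fr < tr := by omega
    have hm2 : (((tr - fr).natAbs : Nat) : Int) = tr - fr := by omega
    simp only [pvCalcDirections, pvIsOver, pvPath, hc, hr, hc2, hc3, hb1, hr2, hb2, decide_true, decide_false,
      ite_true, ite_false, Int.natAbs_zero, List.replicate_zero, lt_self_iff_false,
      List.singleton_append, List.cons_append, List.nil_append, List.foldl_cons, List.foldl_nil]
    rw [walkDown nr nc (tr - fr).natAbs fr fc]
    simp only [hm2]
    by_cases hP1 : nc = fc ∧ fr < nr ∧ nr ≤ fr + (tr - fr)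
    · rw [if_pos hP1]
      have hB : pvHitsGap (fr, fc) (tr, tc) (nr, nc) false = true := by
        simp only [pvHitsGap, pvBetween, Bool.false_eq_true, Bool.true_eq_false, beq_iff_eq,
          beq_eq_false_iff_ne, ne_eq, Prod.mk.injEq, Bool.or_eq_true, Bool.and_eq_true,
          decide_eq_true_eq, Bool.or_eq_false_iff, Bool.and_eq_false_iff,
          decide_eq_false_iff_not, min_def, max_def]
        split_ifs <;>
    (try simp only [Bool.or_eq_true, Bool.and_eq_true, beq_iff_eq, decide_eq_true_eq,
      Bool.or_eq_false_iff, Bool.and_eq_false_iff, decide_eq_false_iff_not,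
      beq_eq_false_iff_ne, ne_eq, Bool.false_eq_true]) <;>
    first | rfl | contradiction | omega
      rw [hB]
      simp [List.flatten]
    · rw [if_neg hP1]
      have hB : pvHitsGap (fr, fc) (tr, tc) (nr, nc) false = false := by
        simp only [pvHitsGap, pvBetween, Bool.false_eq_true, Bool.true_eq_false, beq_iff_eq,
          beq_eq_false_iff_ne, ne_eq, Prod.mk.injEq, Bool.or_eq_true, Bool.and_eq_true,
          decide_eq_true_eq, Bool.or_eq_false_iff, Bool.and_eq_false_iff,
          decide_eq_false_iff_not, min_def, max_def]
        split_ifs <;>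
    (try simp only [Bool.or_eq_true, Bool.and_eq_true, beq_iff_eq, decide_eq_true_eq,
      Bool.or_eq_false_iff, Bool.and_eq_false_iff, decide_eq_false_iff_not,
      beq_eq_false_iff_ne, ne_eq, Bool.false_eq_true]) <;>
    first | rfl | contradiction | omega
      rw [hB]
      simp [List.flatten]
  · have hc2 : ¬ (tc - fc < 0) := by omega
    have hb1 : ¬ (tc < fc) := by omega
    have hm1 : (((tc - fc).natAbs : Nat) : Int) = tc - fc := by omega
    have hr2 : ¬ (0 < tr - fr) := by omega
    have hb2 : ¬ (fr < tr) := by omega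
    have hm2 : (((tr - fr).natAbs : Nat) : Int) = fr - tr := by omega
    simp only [pvCalcDirections, pvIsOver, pvPath, hc, hr, hc2, hb1, hr2, hb2, decide_true, decide_false,
      ite_true, ite_false, Int.natAbs_zero, List.replicate_zero, lt_self_iff_false,
      List.singleton_append, List.cons_append, List.nil_append, List.foldl_cons, List.foldl_nil]
    rw [walkUp nr nc (tr - fr).natAbs fr fc]
    simp only [hm1, hm2]
    by_cases hP1 : nc = fc ∧ fr - (fr - tr) ≤ nr ∧ nr < fr
    · rw [if_pos hP1, stepTrue]
      have hB : pvHitsGap (fr, fc) (tr, tc) (nr, nc) false = true := by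
        simp only [pvHitsGap, pvBetween, Bool.false_eq_true, Bool.true_eq_false, beq_iff_eq,
          beq_eq_false_iff_ne, ne_eq, Prod.mk.injEq, Bool.or_eq_true, Bool.and_eq_true,
          decide_eq_true_eq, Bool.or_eq_false_iff, Bool.and_eq_false_iff,
          decide_eq_false_iff_not, min_def, max_def]
        split_ifs <;>
    (try simp only [Bool.or_eq_true, Bool.and_eq_true, beq_iff_eq, decide_eq_true_eq,
      Bool.or_eq_false_iff, Bool.and_eq_false_iff, decide_eq_false_iff_not,
      beq_eq_false_iff_ne, ne_eq, Bool.false_eq_true]) <;>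
    first | rfl | contradiction | omega
      rw [hB]
      simp [List.flatten]
    · rw [if_neg hP1]
      rw [walkRight nr nc (tc - fc).natAbs (fr - (fr - tr)) fc]
      simp only [hm1, hm2]
      by_cases hP2 : nr = fr - (fr - tr) ∧ fc < nc ∧ nc ≤ fc + (tc - fc)
      · rw [if_pos hP2]
        have hB : pvHitsGap (fr, fc) (tr, tc) (nr, nc) false = true := by
          simp only [pvHitsGap, pvBetween, Bool.false_eq_true, Bool.true_eq_false, beq_iff_eq,
            beq_eq_false_iff_ne, ne_eq, Prod.mk.injEq, Bool.or_eq_true, Bool.and_eq_true,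
            decide_eq_true_eq, Bool.or_eq_false_iff, Bool.and_eq_false_iff,
            decide_eq_false_iff_not, min_def, max_def]
          split_ifs <;>
    (try simp only [Bool.or_eq_true, Bool.and_eq_true, beq_iff_eq, decide_eq_true_eq,
      Bool.or_eq_false_iff, Bool.and_eq_false_iff, decide_eq_false_iff_not,
      beq_eq_false_iff_ne, ne_eq, Bool.false_eq_true]) <;>
    first | rfl | contradiction | omega
        rw [hB]
        simp [List.flatten]
      · rw [if_neg hP2]
        have hB : pvHitsGap (fr, fc) (tr, tc) (nr, nc) false = false := by
          simp only [pvHitsGap, pvBetween, Bool.false_eq_true, Bool.true_eq_false, beq_iff_eq,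
            beq_eq_false_iff_ne, ne_eq, Prod.mk.injEq, Bool.or_eq_true, Bool.and_eq_true,
            decide_eq_true_eq, Bool.or_eq_false_iff, Bool.and_eq_false_iff,
            decide_eq_false_iff_not, min_def, max_def]
          split_ifs <;>
    (try simp only [Bool.or_eq_true, Bool.and_eq_true, beq_iff_eq, decide_eq_true_eq,
      Bool.or_eq_false_iff, Bool.and_eq_false_iff, decide_eq_false_iff_not,
      beq_eq_false_iff_ne, ne_eq, Bool.false_eq_true]) <;>
    first | rfl | contradiction | omega
        rw [hB]
        simp [List.flatten]
  · have hc2 : ¬ (tc - fc < 0) := by omega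
    have hb1 : ¬ (tc < fc) := by omega
    have hm1 : (((tc - fc).natAbs : Nat) : Int) = tc - fc := by omega
    have hr2 : ¬ (tr - fr < 0) := by omega
    have hr3 : ¬ (0 < tr - fr) := by omega
    have hb2 : ¬ (fr < tr) := by omega
    simp only [pvCalcDirections, pvIsOver, pvPath, hc, hr, hc2, hb1, hr2, hr3, hb2, decide_true, decide_false,
      ite_true, ite_false, Int.natAbs_zero, List.replicate_zero, lt_self_iff_false,
      List.singleton_append, List.cons_append, List.nil_append, List.foldl_cons, List.foldl_nil]
    rw [walkRight nr nc (tc - fc).natAbs fr fc]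
    simp only [hm1]
    by_cases hP1 : nr = fr ∧ fc < nc ∧ nc ≤ fc + (tc - fc)
    · rw [if_pos hP1]
      have hB : pvHitsGap (fr, fc) (tr, tc) (nr, nc) false = true := by
        simp only [pvHitsGap, pvBetween, Bool.false_eq_true, Bool.true_eq_false, beq_iff_eq,
          beq_eq_false_iff_ne, ne_eq, Prod.mk.injEq, Bool.or_eq_true, Bool.and_eq_true,
          decide_eq_true_eq, Bool.or_eq_false_iff, Bool.and_eq_false_iff,
          decide_eq_false_iff_not, min_def, max_def]
        split_ifs <;>
    (try simp only [Bool.or_eq_true, Bool.and_eq_true, beq_iff_eq, decide_eq_true_eq,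
      Bool.or_eq_false_iff, Bool.and_eq_false_iff, decide_eq_false_iff_not,
      beq_eq_false_iff_ne, ne_eq, Bool.false_eq_true]) <;>
    first | rfl | contradiction | omega
      rw [hB]
      simp [List.flatten]
    · rw [if_neg hP1]
      have hB : pvHitsGap (fr, fc) (tr, tc) (nr, nc) false = false := by
        simp only [pvHitsGap, pvBetween, Bool.false_eq_true, Bool.true_eq_false, beq_iff_eq,
          beq_eq_false_iff_ne, ne_eq, Prod.mk.injEq, Bool.or_eq_true, Bool.and_eq_true,
          decide_eq_true_eq, Bool.or_eq_false_iff, Bool.and_eq_false_iff,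
          decide_eq_false_iff_not, min_def, max_def]
        split_ifs <;>
    (try simp only [Bool.or_eq_true, Bool.and_eq_true, beq_iff_eq, decide_eq_true_eq,
      Bool.or_eq_false_iff, Bool.and_eq_false_iff, decide_eq_false_iff_not,
      beq_eq_false_iff_ne, ne_eq, Bool.false_eq_true]) <;>
    first | rfl | contradiction | omega
      rw [hB]
      simp [List.flatten]
  · have hc2 : ¬ (tc - fc < 0) := by omega
    have hb1 : ¬ (tc < fc) := by omega
    have hm1 : (((tc - fc).natAbs : Nat) : Int) = tc - fc := by omega
    have hr2 : ¬ (tr - fr < 0) := by omega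
    have hb2 : fr < tr := by omega
    have hm2 : (((tr - fr).natAbs : Nat) : Int) = tr - fr := by omega
    simp only [pvCalcDirections, pvIsOver, pvPath, hc, hr, hc2, hb1, hr2, hb2, decide_true, decide_false,
      ite_true, ite_false, Int.natAbs_zero, List.replicate_zero, lt_self_iff_false,
      List.singleton_append, List.cons_append, List.nil_append, List.foldl_cons, List.foldl_nil]
    rw [walkDown nr nc (tr - fr).natAbs fr fc]
    simp only [hm1, hm2]
    by_cases hP1 : nc = fc ∧ fr < nr ∧ nr ≤ fr + (tr - fr)
    · rw [if_pos hP1, stepTrue]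
      have hB : pvHitsGap (fr, fc) (tr, tc) (nr, nc) false = true := by
        simp only [pvHitsGap, pvBetween, Bool.false_eq_true, Bool.true_eq_false, beq_iff_eq,
          beq_eq_false_iff_ne, ne_eq, Prod.mk.injEq, Bool.or_eq_true, Bool.and_eq_true,
          decide_eq_true_eq, Bool.or_eq_false_iff, Bool.and_eq_false_iff,
          decide_eq_false_iff_not, min_def, max_def]
        split_ifs <;>
    (try simp only [Bool.or_eq_true, Bool.and_eq_true, beq_iff_eq, decide_eq_true_eq,
      Bool.or_eq_false_iff, Bool.and_eq_false_iff, decide_eq_false_iff_not,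
      beq_eq_false_iff_ne, ne_eq, Bool.false_eq_true]) <;>
    first | rfl | contradiction | omega
      rw [hB]
      simp [List.flatten]
    · rw [if_neg hP1]
      rw [walkRight nr nc (tc - fc).natAbs (fr + (tr - fr)) fc]
      simp only [hm1, hm2]
      by_cases hP2 : nr = fr + (tr - fr) ∧ fc < nc ∧ nc ≤ fc + (tc - fc)
      · rw [if_pos hP2]
        have hB : pvHitsGap (fr, fc) (tr, tc) (nr, nc) false = true := by
          simp only [pvHitsGap, pvBetween, Bool.false_eq_true, Bool.true_eq_false, beq_iff_eq,
            beq_eq_false_iff_ne, ne_eq, Prod.mk.injEq, Bool.or_eq_true, Bool.and_eq_true,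
            decide_eq_true_eq, Bool.or_eq_false_iff, Bool.and_eq_false_iff,
            decide_eq_false_iff_not, min_def, max_def]
          split_ifs <;>
    (try simp only [Bool.or_eq_true, Bool.and_eq_true, beq_iff_eq, decide_eq_true_eq,
      Bool.or_eq_false_iff, Bool.and_eq_false_iff, decide_eq_false_iff_not,
      beq_eq_false_iff_ne, ne_eq, Bool.false_eq_true]) <;>
    first | rfl | contradiction | omega
        rw [hB]
        simp [List.flatten]
      · rw [if_neg hP2]
        have hB : pvHitsGap (fr, fc) (tr, tc) (nr, nc) false = false := by
          simp only [pvHitsGap, pvBetween, Bool.false_eq_true, Bool.true_eq_false, beq_iff_eq,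
            beq_eq_false_iff_ne, ne_eq, Prod.mk.injEq, Bool.or_eq_true, Bool.and_eq_true,
            decide_eq_true_eq, Bool.or_eq_false_iff, Bool.and_eq_false_iff,
            decide_eq_false_iff_not, min_def, max_def]
          split_ifs <;>
    (try simp only [Bool.or_eq_true, Bool.and_eq_true, beq_iff_eq, decide_eq_true_eq,
      Bool.or_eq_false_iff, Bool.and_eq_false_iff, decide_eq_false_iff_not,
      beq_eq_false_iff_ne, ne_eq, Bool.false_eq_true]) <;>
    first | rfl | contradiction | omega
        rw [hB]
        simp [List.flatten]

theorem foldl_if_filter {α β : Type} (P : α → Prop) [DecidablePred P] (g : β → α → β)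
    (l : List α) (b : β) :
    l.foldl (fun d t => if P t then g d t else d) b = (l.filter (fun t => P t)).foldl g b := by
  induction l generalizing b with
  | nil => rfl
  | cons x xs ih => by_cases h : P x <;> simp [h, ih]

theorem inner_items (keypad : List (String × Int × Int)) (n : Int × Int)
    (f : String × Int × Int) (hpre : (keypad.map Prod.fst).Nodup) :
    (keypad.foldl (fun inner t =>
        if f.1 ≠ t.1 then inner.insert t.1 (pvCalcDirections f.2 t.2 n) else inner)
        (PySem.Dict.empty : PySem.Dict String String)).items
      = (keypad.filter (fun t => f.1 ≠ t.1)).map (fun t => (t.1, pvCalcDirections f.2 t.2 n)) := by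
  have hf := foldl_if_filter (fun t : String × Int × Int => f.1 ≠ t.1)
    (fun (d : PySem.Dict String String) t => d.insert t.1 (pvCalcDirections f.2 t.2 n))
    keypad (PySem.Dict.empty)
  rw [hf]
  rw [PySem.Dict.items_foldl_insert_fresh _ Prod.fst (fun t => pvCalcDirections f.2 t.2 n)
        PySem.Dict.empty (fun a _ => rfl)
        (((List.filter_sublist (l := keypad)).map Prod.fst).nodup hpre)]
  rfl

-- ===== VERDICT (by name: the statement is the Claim_ definition above) =====
theorem generate_keypad_mapping_spec : Claim_equal_generate_keypad_mapping := by
  intro keypad n _ hpre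
  unfold Spec_generate_keypad_mapping generate_keypad_mapping generate_keypad_mapping_alt
  rw [PySem.Dict.items_foldl_insert_fresh keypad Prod.fst
        (fun f => keypad.foldl (fun inner t =>
          if f.1 ≠ t.1 then inner.insert t.1 (pvCalcDirections f.2 t.2 n) else inner)
          PySem.Dict.empty)
        PySem.Dict.empty (fun a _ => rfl) hpre]
  have he : (PySem.Dict.empty : PySem.Dict String (PySem.Dict String String)).items = [] := rfl
  rw [he, List.nil_append, List.map_map]
  refine List.map_congr_left (fun f _ => ?_)
  simp only [Function.comp]
  rw [inner_items keypad n f hpre]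
  refine congrArg _ (List.map_congr_left (fun t _ => ?_)) 
  obtain ⟨fk, ff⟩ := f; obtain ⟨tk, tt⟩ := t
  obtain ⟨fr, fc⟩ := ff; obtain ⟨tr, tc⟩ := tt; obtain ⟨nr, nc⟩ := n
  rw [core fr fc tr tc nr nc]
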